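-- pv_equiv track=rewrite | github.com/onikw/Owner-avatar-Introduction_to_computer_science_course | Zestaw3/z12.py | najdcm
-- ===== SOURCE A (Python) =====
-- def najdcm(tab):
--     r=tab[1]-tab[0]
--     dl=2
--     maksdl=0
--     for i in range(2,len(tab)):
--         if tab[i]-tab[i-1]==r and r<0:
--             dl+=1
--             maksdl=max(maksdl,dl)
--
--         else:
--             dl=2
--             r=tab[i]-tab[i-1]
--     return maksdl
-- ===== SOURCE B (Python) =====
-- def najdcm(tab):
--     diffs = [y - x for x, y in zip(tab, tab[1:])]
--     best = 0
--     i = 0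
--     m = len(diffs)
--     while i < m:
--         d = diffs[i]
--         j = i + 1
--         while j < m and diffs[j] == d:
--             j += 1
--         if d < 0 and j - i >= 2:
--             best = max(best, j - i + 1)
--         i = j
--     return best
-- ===== Notes on version B (the rewrite author's own statement) =====
-- stated objective: alternative
-- what changed: A's incremental state machine carrying (current difference, current run length, best) over indices is replaced by building the consecutive-differences list and scanning it run by run: each outer step consumes one maximal block of equal differences and scores it if negative.
-- outside the precondition, e.g. on najdcm([1]): A raises IndexError, B returns 0; on najdcm([0]): A raises IndexError, B returns 0
import Mathlib
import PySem

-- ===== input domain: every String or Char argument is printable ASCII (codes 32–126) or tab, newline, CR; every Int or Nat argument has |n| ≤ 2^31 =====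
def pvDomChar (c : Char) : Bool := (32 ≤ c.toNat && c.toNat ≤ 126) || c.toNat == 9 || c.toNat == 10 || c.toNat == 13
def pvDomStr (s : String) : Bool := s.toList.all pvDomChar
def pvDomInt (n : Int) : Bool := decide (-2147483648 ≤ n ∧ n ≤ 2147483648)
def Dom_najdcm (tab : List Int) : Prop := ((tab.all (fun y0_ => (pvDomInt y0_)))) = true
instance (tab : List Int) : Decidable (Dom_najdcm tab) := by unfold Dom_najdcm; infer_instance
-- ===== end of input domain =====

-- B replaces A's incremental state machine (current difference, current run length) with an
-- explicit consecutive-differences list grouped into maximal equal runs; objective: alternative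
-- decomposition, same O(n) cost.

-- ===== PORT A =====
-- state = (r, dl, maksdl); loop over range(2, len(tab)) with tab[i] accesses
def najdcm (tab : List Int) : Int :=
  let r := PySem.List.pyGetD tab 1 0 - PySem.List.pyGetD tab 0 0
  let s := (PySem.List.pyRange 2 tab.length 1).foldl
    (fun (s : Int × Int × Int) i =>
      let t := PySem.List.pyGetD tab i 0 - PySem.List.pyGetD tab (i - 1) 0
      if t = s.1 ∧ s.1 < 0 then (s.1, s.2.1 + 1, max s.2.2 (s.2.1 + 1))
      else (t, 2, s.2.2))
    (r, 2, 0)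
  s.2.2

-- ===== PORT B =====
-- Source B's outer while loop over the shrinking diffs list (each step consumes one maximal run)
def bRuns : List Int → Int
  | [] => 0
  | d :: rest =>
    let n : Int := (rest.takeWhile (· == d)).length + 1
    let best := if d < 0 ∧ n ≥ 2 then n + 1 else 0
    max best (bRuns (rest.dropWhile (· == d)))
termination_by l => l.length
decreasing_by
  simp only [List.length_cons]
  exact Nat.lt_succ_of_le (List.length_dropWhile_le _ _)

def najdcm_alt (tab : List Int) : Int :=
  bRuns (List.zipWith (fun x y => y - x) tab tab.tail)

-- ===== PRECONDITION & SPEC =====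
-- A evaluates tab[1]-tab[0] unconditionally, so it raises IndexError on lists shorter than 2.
def Pre_najdcm (tab : List Int) : Prop := 2 ≤ tab.length
instance (tab : List Int) : Decidable (Pre_najdcm tab) := by unfold Pre_najdcm; infer_instance
def pvWitness_najdcm : List Int := [5, 3, 1, 4]

def Spec_najdcm (tab : List Int) (out : Int) : Prop := out = najdcm_alt tab
instance (tab : List Int) (out : Int) : Decidable (Spec_najdcm tab out) := by unfold Spec_najdcm; infer_instance

-- ===== CLAIM (what is proved, stated in full; the proofs are below) =====
def Claim_equal_najdcm : Prop := ∀ (tab : List Int), Dom_najdcm tab → Pre_najdcm tab → Spec_najdcm tab (najdcm tab)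

-- ===== LEMMAS AND PROOFS =====

-- A's loop body re-expressed as a step on a difference value
def aStep (s : Int × Int × Int) (d : Int) : Int × Int × Int :=
  if d = s.1 ∧ s.1 < 0 then (s.1, s.2.1 + 1, max s.2.2 (s.2.1 + 1))
  else (d, 2, s.2.2)

def diffs (tab : List Int) : List Int := List.zipWith (fun x y => y - x) tab tab.tail

lemma bRuns_nonneg (l : List Int) : 0 ≤ bRuns l := by
  induction l using bRuns.induct with
  | case1 => simp [bRuns]
  | case2 d rest ih =>
    rw [bRuns]
    exact le_max_of_le_right ih

-- the state-machine fold equals max of m with the run decomposition, generalized over state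
lemma foldl_aStep_eq (ds : List Int) : ∀ (d dl m : Int), 2 ≤ dl → 0 ≤ m →
    (ds.foldl aStep (d, dl, m)).2.2 =
      max m (max (if d < 0 ∧ (ds.takeWhile (· == d)) ≠ [] then dl + (ds.takeWhile (· == d)).length else 0)
                 (bRuns (ds.dropWhile (· == d)))) := by
  induction ds with
  | nil =>
    intro d dl m _ hm
    simp [bRuns]
    omega
  | cons d1 rest ih =>
    intro d dl m hdl hm
    by_cases h1 : d1 = d ∧ d < 0
    · obtain ⟨rfl, hneg⟩ := h1
      have hstep : aStep (d1, dl, m) d1 = (d1, dl + 1, max m (dl + 1)) := by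
        simp [aStep, hneg]
      rw [List.foldl_cons, hstep,
        ih d1 (dl + 1) (max m (dl + 1)) (by omega) (by omega)]
      have htw : (d1 :: rest).takeWhile (· == d1) = d1 :: rest.takeWhile (· == d1) := by
        simp
      have hdw : (d1 :: rest).dropWhile (· == d1) = rest.dropWhile (· == d1) := by
        simp
      rw [htw, hdw]
      have hb := bRuns_nonneg (rest.dropWhile (· == d1))
      by_cases h2 : rest.takeWhile (· == d1) = []
      · simp [h2, hneg]
        omega
      · simp [h2, hneg]
        have : 1 ≤ (rest.takeWhile (· == d1)).length := by
          cases h : rest.takeWhile (· == d1) with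
          | nil => exact absurd h h2
          | cons a l => simp
        omega
    · -- else branch: reset to (d1, 2, m)
      have hstep : aStep (d, dl, m) d1 = (d1, 2, m) := by
        simp only [aStep]
        rw [if_neg h1]
      rw [List.foldl_cons, hstep, ih d1 2 m (by omega) hm]
      by_cases hd1d : d1 = d
      · -- then ¬ d < 0
        subst hd1d
        have hnneg : ¬ d1 < 0 := fun hc => h1 ⟨rfl, hc⟩
        have htw : (d1 :: rest).takeWhile (· == d1) = d1 :: rest.takeWhile (· == d1) := by
          simp
        have hdw : (d1 :: rest).dropWhile (· == d1) = rest.dropWhile (· == d1) := by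
          simp
        rw [htw, hdw]
        simp [hnneg]
      · have htw : (d1 :: rest).takeWhile (· == d) = [] := by
          simp [hd1d]
        have hdw : (d1 :: rest).dropWhile (· == d) = d1 :: rest := by
          simp [hd1d]
        rw [htw, hdw, bRuns]
        simp only [ne_eq, not_true_eq_false, and_false, if_false]
        have hb := bRuns_nonneg (rest.dropWhile (· == d1))
        by_cases h2 : rest.takeWhile (· == d1) = []
        · simp [h2]
        · have hlen : 1 ≤ (rest.takeWhile (· == d1)).length := by
            cases h : rest.takeWhile (· == d1) with
            | nil => exact absurd h h2
            | cons a l => simp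
          by_cases hneg1 : d1 < 0
          · have hc : (2:Int) ≤ ((rest.takeWhile (· == d1)).length : Int) + 1 := by omega
            simp [h2, hneg1, hc]
            omega
          · simp [h2, hneg1]

-- starting state (d, 2, 0) gives exactly bRuns (d :: ds)
lemma foldl_aStep_bRuns (d : Int) (ds : List Int) :
    (ds.foldl aStep (d, 2, 0)).2.2 = bRuns (d :: ds) := by
  rw [foldl_aStep_eq ds d 2 0 (by omega) (by omega), bRuns]
  have hb := bRuns_nonneg (ds.dropWhile (· == d))
  by_cases h2 : ds.takeWhile (· == d) = []
  · simp [h2]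
  · have hlen : 1 ≤ (ds.takeWhile (· == d)).length := by
      cases h : ds.takeWhile (· == d) with
      | nil => exact absurd h h2
      | cons a l => simp
    by_cases hneg : d < 0
    · have hc : (2:Int) ≤ ((ds.takeWhile (· == d)).length : Int) + 1 := by omega
      simp [h2, hneg, hc]
      omega
    · simp [h2, hneg]

lemma diffs_getElem (tab : List Int) (j : Nat) (h : j + 1 < tab.length) :
    (diffs tab)[j]'(by simp [diffs]; omega) = tab[j + 1] - tab[j]'(by omega) := by
  simp [diffs]

lemma diffs_length (tab : List Int) : (diffs tab).length = tab.length - 1 := by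
  simp [diffs]

-- bridge: the index fold over pyRange equals the fold over the diffs list
lemma fold_range_eq_fold_diffs (tab : List Int) : ∀ (j : Nat) (s : Int × Int × Int),
    1 ≤ j → j ≤ tab.length - 1 →
    (PySem.List.pyRange (j + 1) tab.length 1).foldl
      (fun (s : Int × Int × Int) i =>
        if PySem.List.pyGetD tab i 0 - PySem.List.pyGetD tab (i - 1) 0 = s.1 ∧ s.1 < 0
        then (s.1, s.2.1 + 1, max s.2.2 (s.2.1 + 1))
        else (PySem.List.pyGetD tab i 0 - PySem.List.pyGetD tab (i - 1) 0, 2, s.2.2)) s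
    = ((diffs tab).drop j).foldl aStep s := by
  intro j s hj hjle
  induction hn : tab.length - 1 - j generalizing j s with
  | zero =>
    have : (tab.length : Int) ≤ (j : Int) + 1 := by omega
    rw [PySem.List.pyRange_one_eq_nil this, List.drop_eq_nil_of_le (by rw [diffs_length]; omega)]
    rfl
  | succ k ih =>
    have hlt : ((j : Int) + 1) < tab.length := by omega
    rw [PySem.List.pyRange_one_cons hlt, List.foldl_cons]
    have hj1 : j + 1 < tab.length := by omega
    have e1 : PySem.List.pyGetD tab ((j : Int) + 1) 0 = tab[j + 1] := by
      have := PySem.List.pyGetD_natCast tab (j + 1) 0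
      push_cast at this
      rw [this, List.getD_eq_getElem _ _ hj1]
    have e2 : PySem.List.pyGetD tab ((j : Int) + 1 - 1) 0 = tab[j]'(by omega) := by
      have h0 : ((j : Int) + 1 - 1) = ((j : Nat) : Int) := by omega
      rw [h0, PySem.List.pyGetD_natCast tab j 0, List.getD_eq_getElem _ _ (by omega)]
    have hdrop : (diffs tab).drop j = (diffs tab)[j]'(by rw [diffs_length]; omega) :: (diffs tab).drop (j + 1) := by
      exact (List.drop_eq_getElem_cons (by rw [diffs_length]; omega))
    rw [hdrop, List.foldl_cons, diffs_getElem tab j hj1]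
    have hstep :
        (if PySem.List.pyGetD tab ((j:Int) + 1) 0 - PySem.List.pyGetD tab ((j:Int) + 1 - 1) 0 = s.1 ∧ s.1 < 0
         then (s.1, s.2.1 + 1, max s.2.2 (s.2.1 + 1))
         else (PySem.List.pyGetD tab ((j:Int) + 1) 0 - PySem.List.pyGetD tab ((j:Int) + 1 - 1) 0, 2, s.2.2))
        = aStep s (tab[j + 1] - tab[j]'(by omega)) := by
      simp only [aStep, e1, e2]
    rw [hstep]
    have hpush : ((j : Int) + 1) = (((j + 1 : Nat)) : Int) := by push_cast; ring
    rw [hpush]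
    by_cases hend : j + 1 ≤ tab.length - 1
    · exact ih (j + 1) _ (by omega) hend (by omega)
    · omega

-- ===== VERDICT (by name: the statement is the Claim_ definition above) =====
theorem najdcm_spec : Claim_equal_najdcm := by
  intro tab _ hpre
  unfold Spec_najdcm najdcm najdcm_alt
  unfold Pre_najdcm at hpre
  have h1 : PySem.List.pyGetD tab 1 0 = tab[1]'(by omega) := by
    have := PySem.List.pyGetD_natCast tab 1 0
    push_cast at this
    rw [this, List.getD_eq_getElem _ _ (by omega)]
  have h0 : PySem.List.pyGetD tab 0 0 = tab[0]'(by omega) := by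
    have := PySem.List.pyGetD_natCast tab 0 0
    push_cast at this
    rw [this, List.getD_eq_getElem _ _ (by omega)]
  have hbridge := fold_range_eq_fold_diffs tab 1 (tab[1]'(by omega) - tab[0]'(by omega), 2, 0) (by omega) (by omega)
  norm_num at hbridge
  simp only [h1, h0]
  rw [hbridge]
  have hd0 : diffs tab = (tab[1]'(by omega) - tab[0]'(by omega)) :: (diffs tab).drop 1 := by
    have hlen : 0 < (diffs tab).length := by rw [diffs_length]; omega
    have hx := List.drop_eq_getElem_cons (l := diffs tab) (i := 0) hlen
    rw [List.drop_zero] at hx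
    rw [diffs_getElem tab 0 (by omega)] at hx
    simpa using hx
  rw [foldl_aStep_bRuns]
  change _ = bRuns (diffs tab)
  conv_rhs => rw [hd0]
  simp
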